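-- pv_equiv track=rewrite | github.com/NullDev/google-foobar | optional/1/1.py | solution
-- ===== SOURCE A (Python) =====
-- from collections import defaultdict
--
-- def gen(c1, c2, len):
--     a = c1 & ~(1 << len)
--     b = c2 & ~(1 << len)
--     c = c1 >> 1
--     d = c2 >> 1
--     return (a & ~b & ~c & ~d) | (~a & b & ~c & ~d) | (~a & ~b & c & ~d) | (~a & ~b & ~c & d)
--
-- def mapper(n, a):
--     m = defaultdict(set)
--     a = set(a)
--     for i in range(1<<(n+1)):
--         for j in range(1<<(n+1)):
--             g = gen(i, j, n)
--             if g in a: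
--                 m[(g, i)].add(j)
--     return m
--
-- def solution(g):
--     g = list(zip(*g))
--     cols = len(g[0])
--     a = [sum([1 << i if col else 0 for i, col in enumerate(row)]) for row in g]
--     m = mapper(cols, a)
--     r = { i: 1 for i in range(1 << (cols + 1))}
--     for row in a:
--         nxt = defaultdict(int)
--         for c1 in r:
--             for c2 in m[(row, c1)]:
--                 nxt[c2] += r[c1]
--         r = nxt
--     return sum(r.values())
-- ===== SOURCE B (Python) =====
-- def gen(c1, c2, len):
--     a = c1 & ~(1 << len)
--     b = c2 & ~(1 << len)
--     c = c1 >> 1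
--     d = c2 >> 1
--     return (a & ~b & ~c & ~d) | (~a & b & ~c & ~d) | (~a & ~b & c & ~d) | (~a & ~b & ~c & d)
--
-- def solution(g):
--     h = len(g)
--     vals = [sum(1 << i for i, cell in enumerate(col) if cell) for col in zip(*g)]
--     size = 1 << (h + 1)
--     # backward DP: cur[c1] = number of ways to extend a preimage column c1 through the
--     # remaining grid columns (processed right-to-left), instead of A's forward
--     # scatter-accumulation into dicts with a precomputed global transition table.
--     cur = [1] * size
--     for v in reversed(vals):
--         cur = [sum(cur[c2] for c2 in range(size) if gen(c1, c2, h) == v)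
--                for c1 in range(size)]
--     return sum(cur)
-- ===== Notes on version B (the rewrite author's own statement) =====
-- stated objective: alternative
-- what changed: Replaces A's precomputed-transition pipeline (mapper scanning all column pairs into a dict of sets, then a forward scatter DP over defaultdicts) by a right-to-left gather DP over plain arrays: cur[c1] = number of completions of the remaining grid columns given left preimage column c1.
-- outside the precondition, e.g. on solution([]): A raises IndexError, B returns 2; on solution([[True], []]): A raises IndexError, B returns 8
import Mathlib
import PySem

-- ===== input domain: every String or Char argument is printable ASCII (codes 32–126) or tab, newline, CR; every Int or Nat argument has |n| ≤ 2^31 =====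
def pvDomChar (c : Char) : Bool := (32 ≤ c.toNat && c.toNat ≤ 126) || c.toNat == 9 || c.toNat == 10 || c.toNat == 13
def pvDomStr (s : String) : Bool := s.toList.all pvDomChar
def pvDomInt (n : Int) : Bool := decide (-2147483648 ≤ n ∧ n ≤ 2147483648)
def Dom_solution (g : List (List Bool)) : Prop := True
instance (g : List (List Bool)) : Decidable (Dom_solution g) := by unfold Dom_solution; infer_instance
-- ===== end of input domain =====

-- B replaces A's precomputed transition table + forward dict-scatter DP by a right-to-left
-- gather DP over plain arrays (objective: alternative, genuinely different traversal, same cost class).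

-- ===== PORT A =====
-- step function `gen` of Source A (Source B defines it verbatim, so it is shared).
-- len, i, j are nonnegative wherever `solution` calls gen, so `.toNat` on the shift amount is exact.
def gen (c1 c2 len : Int) : Int :=
  let a := PySem.Int.band c1 (Int.not ((1:Int) <<< len.toNat))
  let b := PySem.Int.band c2 (Int.not ((1:Int) <<< len.toNat))
  let c := c1 >>> (1:Nat)
  let d := c2 >>> (1:Nat)
  PySem.Int.bor (PySem.Int.bor (PySem.Int.bor
    (PySem.Int.band (PySem.Int.band (PySem.Int.band a (Int.not b)) (Int.not c)) (Int.not d))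
    (PySem.Int.band (PySem.Int.band (PySem.Int.band (Int.not a) b) (Int.not c)) (Int.not d)))
    (PySem.Int.band (PySem.Int.band (PySem.Int.band (Int.not a) (Int.not b)) c) (Int.not d)))
    (PySem.Int.band (PySem.Int.band (PySem.Int.band (Int.not a) (Int.not b)) (Int.not c)) d)

-- zip(*g): transpose truncated to the shortest row (exact for CPython's zip; the first row's
-- length bounds the number of tuples, so it serves as structural fuel).
def zipStarAux : Nat → List (List Bool) → List (List Bool)
  | 0, _ => []
  | n+1, rows =>
    if rows.all (fun r => !r.isEmpty) then
      rows.map (fun r => r.headD false) :: zipStarAux n (rows.map (fun r => r.tail))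
    else []

def zipStar (rows : List (List Bool)) : List (List Bool) :=
  match rows with
  | [] => []
  | r0 :: rest => zipStarAux r0.length (r0 :: rest)

-- 1 << i with i = the (always nonnegative) enumerate index
def pyShl1 (i : Nat) : Int := (1:Int) <<< i

-- sum([1 << i if col else 0 for i, col in enumerate(row)])  (Source A's encoding of one column)
def encodeA (row : List Bool) : Int :=
  ((PySem.List.enumerate row).map (fun p => if p.2 then pyShl1 p.1.toNat else 0)).sum

def mapper (n : Int) (a : List Int) : PySem.Dict (Int × Int) (PySem.Set Int) :=
  let aset : PySem.Set Int := PySem.Set.ofList a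
  (PySem.List.pyRange 0 ((1:Int) <<< (n+1).toNat) 1).foldl (fun m i =>
    (PySem.List.pyRange 0 ((1:Int) <<< (n+1).toNat) 1).foldl (fun m j =>
      let gv := gen i j n
      if aset.contains gv then m.modify (gv, i) PySem.Set.empty (fun s => PySem.Set.add s j)
      else m) m) PySem.Dict.empty

def solution (g : List (List Bool)) : Int :=
  let gt := zipStar g
  let cols : Int := ((gt.headD []).length : Int)   -- g[0]: IndexError when gt = [] (excluded by Pre_)
  let a : List Int := gt.map encodeA
  let m := mapper cols a
  let r0 : PySem.Dict Int Int :=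
    (PySem.List.pyRange 0 ((1:Int) <<< (cols+1).toNat) 1).foldl
      (fun d i => d.insert i 1) PySem.Dict.empty
  let rf : PySem.Dict Int Int := a.foldl (fun r row =>
    r.keys.foldl (fun nxt c1 =>
      ((m.getD (row, c1) PySem.Set.empty : List Int).foldl (fun nxt c2 =>
        nxt.modify c2 0 (fun x => x + r.getD c1 0)) nxt)) PySem.Dict.empty) r0
  rf.values.sum

-- ===== PORT B =====
-- sum(1 << i for i, cell in enumerate(col) if cell)  (Source B's encoding of one column)
def encodeB (col : List Bool) : Int :=
  (((PySem.List.enumerate col).filter (fun p => p.2)).map (fun p => pyShl1 p.1.toNat)).sum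

def solution_alt (g : List (List Bool)) : Int :=
  let h : Int := (g.length : Int)
  let vals : List Int := (zipStar g).map encodeB
  let size : Int := (1:Int) <<< (h+1).toNat
  let cur0 : List Int := PySem.List.pyRepeat [1] size          -- [1] * size
  let cur : List Int := vals.reverse.foldl (fun cur v =>
    (PySem.List.pyRange 0 size 1).map (fun c1 =>
      (((PySem.List.pyRange 0 size 1).filter (fun c2 => gen c1 c2 h == v)).map
        (fun c2 => PySem.List.pyGetD cur c2 0)).sum)) cur0
  cur.sum

-- ===== PRECONDITION & SPEC =====
-- A raises IndexError on g = [] and on a g containing an empty row (zip(*g) is then empty and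
-- A indexes g[0] into it); Pre_ excludes exactly those inputs.
def Pre_solution (g : List (List Bool)) : Prop := g ≠ [] ∧ ∀ r ∈ g, r ≠ []
instance (g : List (List Bool)) : Decidable (Pre_solution g) := by unfold Pre_solution; infer_instance

def pvWitness_solution : List (List Bool) := [[true, false], [false, true]]

def Spec_solution (g : List (List Bool)) (out : Int) : Prop := out = solution_alt g
instance (g : List (List Bool)) (out : Int) : Decidable (Spec_solution g out) := by unfold Spec_solution; infer_instance

-- ===== CLAIM (what is proved, stated in full; the proofs are below) =====
def Claim_equal_solution : Prop := ∀ (g : List (List Bool)), Dom_solution g → Pre_solution g → Spec_solution g (solution g)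


-- ===== LEMMAS AND PROOFS =====

def ways (n : Int) (N : Nat) : List Int → Int → Int
  | [], _ => 1
  | v :: rest, c1 =>
    (((PySem.List.pyRange 0 (N : Int) 1).filter (fun c2 => gen c1 c2 n == v)).map
      (fun c2 => ways n N rest c2)).sum

def ksum (r : PySem.Dict Int Int) (φ : Int → Int) : Int :=
  (r.keys.map (fun k => r.getD k 0 * φ k)).sum

lemma shlOne (m : Nat) : ((1:Int) <<< m) = ((2^m : Nat) : Int) := by
  rw [Int.shiftLeft_eq]; push_cast; ring

lemma range_nodup (N : Nat) : (PySem.List.pyRange 0 (N : Int) 1).Nodup := by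
  rw [PySem.List.pyRange_zero_natCast]
  exact List.nodup_range.map (fun a b h => by exact_mod_cast h)

lemma zipStar_head_length (g : List (List Bool)) (hne : g ≠ []) (hrows : ∀ r ∈ g, r ≠ []) :
    ((zipStar g).headD []).length = g.length := by
  match g, hne with
  | r0 :: rest, _ =>
    have h0 : r0 ≠ [] := hrows r0 (by simp)
    obtain ⟨x, t, rfl⟩ := List.exists_cons_of_ne_nil h0
    have hall : ((x :: t) :: rest).all (fun r => !r.isEmpty) = true := by
      simp only [List.all_eq_true]
      intro r hr
      have := hrows r hr
      simpa [List.isEmpty_iff] using this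
    simp [zipStar, zipStarAux, hall]

lemma r0_facts (N : Nat) :
    ((PySem.List.pyRange 0 (N : Int) 1).foldl
        (fun (d : PySem.Dict Int Int) i => d.insert i 1) PySem.Dict.empty).items
      = (PySem.List.pyRange 0 (N : Int) 1).map (fun i => (i, 1)) := by
  have := PySem.Dict.items_foldl_insert_fresh (PySem.List.pyRange 0 (N : Int) 1)
      (fun i => i) (fun _ => (1:Int)) PySem.Dict.empty
      (by intro a _; simp [PySem.Dict.contains_empty])
      (by simpa using range_nodup N)
  simpa [PySem.Dict.items] using this

lemma sum_map_update (l : List Int) (hnd : l.Nodup) (k : Int) (hk : k ∈ l)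
    (f : Int → Int) (c : Int) :
    (l.map (fun x => if x = k then f x + c else f x)).sum = (l.map f).sum + c := by
  induction l with
  | nil => simp at hk
  | cons x t ih =>
    rcases List.mem_cons.mp hk with h | h
    · subst h
      have hc : ∀ y ∈ t, (if y = k then f y + c else f y) = f y := by
        intro y hy
        have hyk : y ≠ k := by rintro rfl; exact (List.nodup_cons.mp hnd).1 hy
        simp [hyk]
      simp [List.map_congr_left hc]
      ring
    · have hx : x ≠ k := by rintro rfl; exact (List.nodup_cons.mp hnd).1 h
      simp only [List.map_cons, List.sum_cons, if_neg hx,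
        ih (List.nodup_cons.mp hnd).2 h]
      ring

lemma ksum_modify_add (d : PySem.Dict Int Int) (hnd : d.keys.Nodup) (k w : Int) (φ : Int → Int) :
    ksum (d.modify k 0 (fun x => x + w)) φ = ksum d φ + w * φ k := by
  unfold ksum
  by_cases hc : d.contains k = true
  · have hkeys : (d.modify k 0 (fun x => x + w)).keys = d.keys := by
      rw [PySem.Dict.keys_modify, PySem.Dict.keys_insert_of_contains d _ hc]
    rw [hkeys]
    have hmem : k ∈ d.keys := (PySem.Dict.contains_iff_mem_keys d k).mp hc
    have hcongr : ∀ y ∈ d.keys,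
        (d.modify k 0 (fun x => x + w)).getD y 0 * φ y
          = (if y = k then d.getD y 0 * φ y + w * φ k else d.getD y 0 * φ y) := by
      intro y _
      rw [PySem.Dict.getD_modify]
      by_cases hy : y = k
      · subst hy; simp; ring
      · simp [hy]
    rw [List.map_congr_left hcongr, sum_map_update d.keys hnd k hmem]
  · have hc' : d.contains k = false := by simpa using hc
    have hkeys : (d.modify k 0 (fun x => x + w)).keys = d.keys ++ [k] := by
      rw [PySem.Dict.keys_modify, PySem.Dict.keys_insert_of_not_contains d _ hc']
    rw [hkeys, List.map_append, List.sum_append]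
    have hnot : k ∉ d.keys := fun hm => by
      simp [(PySem.Dict.contains_iff_mem_keys d k).mpr hm] at hc'
    have hcongr : ∀ y ∈ d.keys,
        (d.modify k 0 (fun x => x + w)).getD y 0 * φ y = d.getD y 0 * φ y := by
      intro y hy
      rw [PySem.Dict.getD_modify]
      have : y ≠ k := fun h => hnot (h ▸ hy)
      simp [this]
    rw [List.map_congr_left hcongr]
    have : (d.modify k 0 (fun x => x + w)).getD k 0 = 0 + w := by
      rw [PySem.Dict.getD_modify]
      simp [PySem.Dict.getD_of_not_contains d 0 hc']
    simp [this]

lemma nodup_keys_modify_step (d : PySem.Dict Int Int) (k : Int) (w : Int)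
    (hnd : d.keys.Nodup) : (d.modify k 0 (fun x => x + w)).keys.Nodup := by
  have := PySem.Dict.nodup_keys_foldl_modify_key [k] (fun x => x) 0
      (fun _ _ => (fun x => x + w)) d hnd
  simpa using this

lemma mem_keys_modify_step (d : PySem.Dict Int Int) (k k' : Int) (w : Int)
    (h : k' ∈ (d.modify k 0 (fun x => x + w)).keys) : k' ∈ d.keys ∨ k' = k := by
  rw [PySem.Dict.keys_modify] at h
  by_cases hc : d.contains k = true
  · rw [PySem.Dict.keys_insert_of_contains d _ hc] at h; exact Or.inl h
  · rw [PySem.Dict.keys_insert_of_not_contains d _ (by simpa using hc)] at h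
    simpa using h

lemma ksum_foldl_modify (s : List Int) (d : PySem.Dict Int Int) (hnd : d.keys.Nodup)
    (w : Int) (φ : Int → Int) :
    ksum (s.foldl (fun nxt c2 => nxt.modify c2 0 (fun x => x + w)) d) φ
      = ksum d φ + w * (s.map φ).sum := by
  induction s generalizing d with
  | nil => simp
  | cons c2 t ih =>
    simp only [List.foldl_cons, List.map_cons, List.sum_cons]
    rw [ih _ (nodup_keys_modify_step d c2 w hnd), ksum_modify_add d hnd c2 w φ]
    ring

lemma nodup_keys_foldl_modify (s : List Int) (d : PySem.Dict Int Int) (w : Int)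
    (hnd : d.keys.Nodup) :
    (s.foldl (fun nxt c2 => nxt.modify c2 0 (fun x => x + w)) d).keys.Nodup := by
  induction s generalizing d with
  | nil => exact hnd
  | cons c2 t ih => exact ih _ (nodup_keys_modify_step d c2 w hnd)

lemma keys_foldl_modify_sub (s : List Int) (d : PySem.Dict Int Int) (w k : Int)
    (hk : k ∈ (s.foldl (fun nxt c2 => nxt.modify c2 0 (fun x => x + w)) d).keys) :
    k ∈ d.keys ∨ k ∈ s := by
  induction s generalizing d with
  | nil => exact Or.inl hk
  | cons c2 t ih =>
    simp only [List.foldl_cons] at hk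
    rcases ih _ hk with h | h
    · rcases mem_keys_modify_step d c2 k w h with h' | h'
      · exact Or.inl h'
      · exact Or.inr (by simp [h'])
    · exact Or.inr (by simp [h])

lemma ksum_outer (ks : List Int) (msets : Int → List Int) (wt : Int → Int)
    (nxt0 : PySem.Dict Int Int) (hnd0 : nxt0.keys.Nodup) (φ : Int → Int) :
    ksum (ks.foldl (fun nxt c1 =>
        (msets c1).foldl (fun nxt c2 => nxt.modify c2 0 (fun x => x + wt c1)) nxt) nxt0) φ
      = ksum nxt0 φ + (ks.map (fun c1 => wt c1 * ((msets c1).map φ).sum)).sum := by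
  induction ks generalizing nxt0 with
  | nil => simp
  | cons c1 t ih =>
    simp only [List.foldl_cons, List.map_cons, List.sum_cons]
    rw [ih _ (nodup_keys_foldl_modify _ _ _ hnd0),
      ksum_foldl_modify _ _ hnd0]
    ring

lemma keys_outer (ks : List Int) (msets : Int → List Int) (wt : Int → Int)
    (nxt0 : PySem.Dict Int Int) (hnd0 : nxt0.keys.Nodup) :
    (ks.foldl (fun nxt c1 =>
        (msets c1).foldl (fun nxt c2 => nxt.modify c2 0 (fun x => x + wt c1)) nxt) nxt0).keys.Nodup
    ∧ ∀ k ∈ (ks.foldl (fun nxt c1 =>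
        (msets c1).foldl (fun nxt c2 => nxt.modify c2 0 (fun x => x + wt c1)) nxt) nxt0).keys,
        k ∈ nxt0.keys ∨ ∃ c1 ∈ ks, k ∈ msets c1 := by
  induction ks generalizing nxt0 with
  | nil => exact ⟨hnd0, fun k hk => Or.inl hk⟩
  | cons c1 t ih =>
    simp only [List.foldl_cons]
    obtain ⟨h1, h2⟩ := ih _ (nodup_keys_foldl_modify _ _ _ hnd0)
    refine ⟨h1, fun k hk => ?_⟩
    rcases h2 k hk with h | ⟨c, hc, hm⟩
    · rcases keys_foldl_modify_sub _ _ _ _ h with h' | h'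
      · exact Or.inl h'
      · exact Or.inr ⟨c1, by simp, h'⟩
    · exact Or.inr ⟨c, by simp [hc], hm⟩

lemma pyGetD_ways (N : Nat) (f : Int → Int) (c2 : Int)
    (hc : c2 ∈ PySem.List.pyRange 0 (N : Int) 1) :
    PySem.List.pyGetD ((PySem.List.pyRange 0 (N : Int) 1).map f) c2 0 = f c2 := by
  obtain ⟨h0, hN⟩ := PySem.List.mem_pyRange_one.mp hc
  have hk : c2 = ((c2.toNat : Nat) : Int) := by omega
  rw [hk]
  exact PySem.List.pyGetD_map_pyRange f N c2.toNat 0 (by omega)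

lemma B_loop (n : Int) (N : Nat) (vs : List Int) :
    vs.reverse.foldl (fun cur v =>
        (PySem.List.pyRange 0 (N : Int) 1).map (fun c1 =>
          (((PySem.List.pyRange 0 (N : Int) 1).filter (fun c2 => gen c1 c2 n == v)).map
            (fun c2 => PySem.List.pyGetD cur c2 0)).sum)) (List.replicate N 1)
      = (PySem.List.pyRange 0 (N : Int) 1).map (ways n N vs) := by
  induction vs with
  | nil =>
    simp only [List.reverse_nil, List.foldl_nil]
    rw [PySem.List.pyRange_zero_natCast, List.map_map]
    simp only [ways, Function.comp_def]
    rw [show (fun (k:Nat) => (1:Int)) = Function.const Nat (1:Int) from rfl, List.map_const, List.length_range]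
  | cons v rest ih =>
    rw [List.reverse_cons, List.foldl_append, List.foldl_cons, List.foldl_nil, ih]
    apply List.map_congr_left
    intro c1 _
    show (((PySem.List.pyRange 0 (N : Int) 1).filter (fun c2 => gen c1 c2 n == v)).map
        (fun c2 => PySem.List.pyGetD ((PySem.List.pyRange 0 (N : Int) 1).map (ways n N rest)) c2 0)).sum
      = ways n N (v :: rest) c1
    rw [show ways n N (v :: rest) c1 = (((PySem.List.pyRange 0 (N : Int) 1).filter
        (fun c2 => gen c1 c2 n == v)).map (fun c2 => ways n N rest c2)).sum from rfl]
    congr 1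
    apply List.map_congr_left
    intro c2 hc2
    exact pyGetD_ways N _ c2 (List.mem_of_mem_filter hc2)
lemma set_contains_of_mem (a : List Int) (v : Int) (hv : v ∈ a) :
    (PySem.Set.ofList a).contains v = true :=
  (PySem.Set.contains_iff _ v).mpr ((PySem.Set.mem_ofList a v).mpr hv)

lemma inner_ne (n : Int) (aset : PySem.Set Int) (i v c1 : Int) (hne : i ≠ c1)
    (js : List Int) (m : PySem.Dict (Int × Int) (PySem.Set Int)) :
    (js.foldl (fun m j =>
        let gv := gen i j n
        if aset.contains gv then m.modify (gv, i) PySem.Set.empty (fun s => PySem.Set.add s j)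
        else m) m).getD (v, c1) PySem.Set.empty = m.getD (v, c1) PySem.Set.empty := by
  induction js generalizing m with
  | nil => rfl
  | cons j t ih =>
    simp only [List.foldl_cons]
    rw [ih]
    by_cases hc : aset.contains (gen i j n) = true
    · simp only [hc, if_true]
      rw [PySem.Dict.getD_modify]
      have hpair : (v, c1) ≠ (gen i j n, i) :=
        fun h => hne ((Prod.ext_iff.mp h).2).symm
      simp [hpair]
    · have hm : gen i j n ∉ aset := by simpa using hc
      simp [hm]

lemma inner_eq (n : Int) (a : List Int) (v c1 : Int) (hv : v ∈ a)
    (js : List Int) (m : PySem.Dict (Int × Int) (PySem.Set Int)) :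
    (js.foldl (fun m j =>
        let gv := gen c1 j n
        if (PySem.Set.ofList a).contains gv then
          m.modify (gv, c1) PySem.Set.empty (fun s => PySem.Set.add s j)
        else m) m).getD (v, c1) PySem.Set.empty
      = (js.filter (fun j => gen c1 j n == v)).foldl PySem.Set.add
          (m.getD (v, c1) PySem.Set.empty) := by
  induction js generalizing m with
  | nil => rfl
  | cons j t ih =>
    simp only [List.foldl_cons, List.filter_cons]
    by_cases hj : gen c1 j n = v
    · rw [hj, set_contains_of_mem a v hv]
      simp only [if_true, beq_self_eq_true]
      rw [ih, List.foldl_cons]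
      congr 1
      exact PySem.Dict.getD_modify_self (d := m) (k := ((v, c1) : Int × Int))
        (d0 := (PySem.Set.empty : PySem.Set Int)) (f := fun s => PySem.Set.add s j)
    · have hbeq : (gen c1 j n == v) = false := by simpa using hj
      rw [hbeq]
      simp only [Bool.false_eq_true, if_false]
      by_cases hc : (PySem.Set.ofList a).contains (gen c1 j n) = true
      · simp only [hc, if_true]
        rw [ih]
        congr 1
        rw [PySem.Dict.getD_modify]
        have hpair : (v, c1) ≠ (gen c1 j n, c1) :=
          fun h => hj ((Prod.ext_iff.mp h).1).symm
        simp [hpair]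
      · rw [if_neg hc]
        exact ih m

lemma outer_ne (n : Int) (a : List Int) (v c1 : Int) (is' : List Int) (hne : ∀ i ∈ is', i ≠ c1)
    (js : List Int) (m : PySem.Dict (Int × Int) (PySem.Set Int)) :
    (is'.foldl (fun m i =>
        js.foldl (fun m j =>
          let gv := gen i j n
          if (PySem.Set.ofList a).contains gv then
            m.modify (gv, i) PySem.Set.empty (fun s => PySem.Set.add s j)
          else m) m) m).getD (v, c1) PySem.Set.empty = m.getD (v, c1) PySem.Set.empty := by
  induction is' generalizing m with
  | nil => rfl
  | cons i t ih =>
    simp only [List.foldl_cons]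
    rw [ih (fun x hx => hne x (by simp [hx]))]
    exact inner_ne n _ i v c1 (hne i (by simp)) js m

lemma mapper_getD (n : Int) (a : List Int) (v c1 : Int) (hv : v ∈ a)
    (hc1 : c1 ∈ PySem.List.pyRange 0 ((1:Int) <<< (n+1).toNat) 1) :
    ((mapper n a).getD (v, c1) PySem.Set.empty : List Int)
      = (PySem.List.pyRange 0 ((1:Int) <<< (n+1).toNat) 1).filter (fun j => gen c1 j n == v) := by
  have hnd : (PySem.List.pyRange 0 ((1:Int) <<< (n+1).toNat) 1).Nodup := by
    rw [shlOne]; exact range_nodup _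
  obtain ⟨l1, l2, hsplit⟩ := List.append_of_mem hc1
  have hnd' := hsplit ▸ hnd
  have hcl : c1 ∉ l1 ++ l2 := (List.nodup_cons.mp (List.nodup_middle.mp hnd')).1
  have hcl1 : ∀ i ∈ l1, i ≠ c1 := fun i hi h => hcl (h ▸ (by simp [hi]))
  have hcl2 : ∀ i ∈ l2, i ≠ c1 := fun i hi h => hcl (h ▸ (by simp [hi]))
  simp only [mapper]
  rw [hsplit, List.foldl_append, List.foldl_cons]
  rw [outer_ne n a v c1 l2 hcl2]
  rw [inner_eq n a v c1 hv]
  rw [outer_ne n a v c1 l1 hcl1]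
  rw [PySem.Dict.getD_empty]
  rw [← hsplit]
  show PySem.Set.update PySem.Set.empty _ = _
  exact PySem.Set.ofList_eq_self_of_nodup _ (List.Nodup.filter _ hnd)

lemma A_dp (n : Int) (N : Nat) (hN : ((1:Int) <<< (n+1).toNat) = (N : Int))
    (aAll : List Int) (vs : List Int) (hvs : ∀ v ∈ vs, v ∈ aAll)
    (r : PySem.Dict Int Int) (hnd : r.keys.Nodup)
    (hsub : ∀ k ∈ r.keys, k ∈ PySem.List.pyRange 0 (N : Int) 1) :
    (vs.foldl (fun r row =>
        r.keys.foldl (fun nxt c1 =>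
          (((mapper n aAll).getD (row, c1) PySem.Set.empty : List Int).foldl (fun nxt c2 =>
            nxt.modify c2 0 (fun x => x + r.getD c1 0)) nxt)) PySem.Dict.empty) r).values.sum
      = ksum r (ways n N vs) := by
  induction vs generalizing r with
  | nil =>
    simp only [List.foldl_nil]
    rw [PySem.Dict.values_eq_map_keys r hnd 0]
    unfold ksum
    simp [ways]
  | cons v rest ih =>
    simp only [List.foldl_cons]
    have hndE : (PySem.Dict.empty : PySem.Dict Int Int).keys.Nodup := by
      simp [PySem.Dict.keys_empty]
    obtain ⟨hndN, hsubN⟩ := keys_outer r.keys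
      (fun c1 => ((mapper n aAll).getD (v, c1) PySem.Set.empty : List Int))
      (fun c1 => r.getD c1 0) PySem.Dict.empty hndE
    have hsubN' : ∀ k ∈ (r.keys.foldl (fun nxt c1 =>
          (((mapper n aAll).getD (v, c1) PySem.Set.empty : List Int).foldl (fun nxt c2 =>
            nxt.modify c2 0 (fun x => x + r.getD c1 0)) nxt)) PySem.Dict.empty).keys,
        k ∈ PySem.List.pyRange 0 (N : Int) 1 := by
      intro k hk
      rcases hsubN k hk with h | ⟨c1, hc1, hm⟩
      · simp [PySem.Dict.keys_empty] at h
      · rw [mapper_getD n aAll v c1 (hvs v (by simp)) (by rw [hN]; exact hsub c1 hc1)] at hm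
        rw [hN] at hm
        exact List.mem_of_mem_filter hm
    rw [ih (fun x hx => hvs x (by simp [hx])) _ hndN hsubN']
    rw [ksum_outer r.keys _ _ _ hndE]
    have hz : ksum PySem.Dict.empty (ways n N rest) = 0 := by
      unfold ksum; simp [PySem.Dict.keys_empty]
    rw [hz, zero_add]
    unfold ksum
    congr 1
    apply List.map_congr_left
    intro c1 hc1
    rw [mapper_getD n aAll v c1 (hvs v (by simp)) (by rw [hN]; exact hsub c1 hc1)]
    rw [hN]
    rfl

lemma ksum_r0 (N : Nat) (φ : Int → Int) :
    ksum ((PySem.List.pyRange 0 (N : Int) 1).foldl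
        (fun (d : PySem.Dict Int Int) i => d.insert i 1) PySem.Dict.empty) φ
      = ((PySem.List.pyRange 0 (N : Int) 1).map φ).sum := by
  have hitems := r0_facts N
  have hkeys : ((PySem.List.pyRange 0 (N : Int) 1).foldl
        (fun (d : PySem.Dict Int Int) i => d.insert i 1) PySem.Dict.empty).keys
      = PySem.List.pyRange 0 (N : Int) 1 := by
    simp [PySem.Dict.keys, hitems, Function.comp_def]
  have hget : ∀ i ∈ PySem.List.pyRange 0 (N : Int) 1,
      ((PySem.List.pyRange 0 (N : Int) 1).foldl
        (fun (d : PySem.Dict Int Int) i => d.insert i 1) PySem.Dict.empty).getD i 0 = 1 := by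
    intro i hi
    have hmem : (i, (1:Int)) ∈ ((PySem.List.pyRange 0 (N : Int) 1).foldl
        (fun (d : PySem.Dict Int Int) i => d.insert i 1) PySem.Dict.empty).items := by
      rw [hitems]; exact List.mem_map.mpr ⟨i, hi, rfl⟩
    have := PySem.Dict.get?_of_mem_items _ hmem (by rw [hkeys]; exact range_nodup N)
    simp [PySem.Dict.getD, this]
  unfold ksum
  rw [hkeys]
  congr 1
  apply List.map_congr_left
  intro i hi
  rw [hget i hi, one_mul]

lemma sum_map_ite_filter (l : List (Int × Bool)) (f : Int × Bool → Int) :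
    (l.map (fun p => if p.2 then f p else 0)).sum = ((l.filter (fun p => p.2)).map f).sum := by
  induction l with
  | nil => rfl
  | cons p t ih =>
    by_cases hp : p.2 <;> simp [hp, ih]

lemma encode_eq (row : List Bool) : encodeA row = encodeB row := by
  unfold encodeA encodeB
  exact sum_map_ite_filter _ _

lemma r0_keys (N : Nat) :
    ((PySem.List.pyRange 0 (N : Int) 1).foldl
        (fun (d : PySem.Dict Int Int) i => d.insert i 1) PySem.Dict.empty).keys
      = PySem.List.pyRange 0 (N : Int) 1 := by
  simp [PySem.Dict.keys, r0_facts N, Function.comp_def]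

lemma main_eq : ∀ (g : List (List Bool)), (g ≠ [] ∧ ∀ r ∈ g, r ≠ []) → solution g = solution_alt g := by
  intro g hpre
  obtain ⟨hne, hrows⟩ := hpre
  have hcols : ((zipStar g).headD []).length = g.length := zipStar_head_length g hne hrows
  simp only [solution, solution_alt, hcols]
  have hN : ((1:Int) <<< (((g.length : Int))+1).toNat) = ((2^(((g.length : Int))+1).toNat : Nat) : Int) := shlOne _
  rw [hN, PySem.List.pyRepeat_singleton, Int.toNat_natCast]
  rw [List.map_congr_left (fun r _ => encode_eq r)]
  rw [B_loop ((g.length : Int)) (2^(((g.length : Int))+1).toNat) ((zipStar g).map encodeB)]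
  rw [A_dp ((g.length : Int)) (2^(((g.length : Int))+1).toNat) hN _ _ (fun v hv => hv) _
      (by rw [r0_keys]; exact range_nodup _) (by intro k hk; rw [r0_keys] at hk; exact hk)]
  rw [ksum_r0]

-- ===== VERDICT (by name: the statement is the Claim_ definition above) =====
theorem solution_spec : Claim_equal_solution := by
  intro g _ hpre
  unfold Pre_solution at hpre
  unfold Spec_solution
  exact main_eq g hpre
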